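-- pv_equiv track=rewrite | github.com/hackinsdn/kubernp | src/kubernp/output.py | create_show_table
-- ===== SOURCE A (Python) =====
-- def create_show_table(data, fields=None, pretty_names_dict={}):
--     """
--     Based on FABRIC fabrictestbed-extensions package.
--
--     Form a table that we can display.
--     """
--     table1 = []
--     table2 = []
--     table_headers = []
--     keys = fields if fields else data.keys()
--     for field in keys:
--         name = pretty_names_dict.get(field, field)
--         if isinstance(data[field], list):
--             for idx, value in enumerate(data[field]):
--                 if len(table1) > idx:
--                     table1[idx].append(value)
--                 else:
--                     table1.append([value])
--             table_headers.append(name)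
--         table2.append([name, data[field]])
--
--     if len(table_headers) == len(keys):
--         return table1, table_headers
--
--     return table2, []
-- ===== SOURCE B (Python) =====
-- def create_show_table(data, fields=None, pretty_names_dict={}):
--     keys = list(fields) if fields else list(data.keys())
--     names = [pretty_names_dict.get(f, f) for f in keys]
--     if all(isinstance(data[f], list) for f in keys):
--         columns = [data[f] for f in keys]
--         m = max(map(len, columns), default=0)
--         return [[c[i] for c in columns if len(c) > i] for i in range(m)], names
--     return [[n, data[f]] for n, f in zip(names, keys)], []
-- ===== Notes on version B (the rewrite author's own statement) =====
-- stated objective: simpler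
-- what changed: Decides the all-values-are-lists branch up front, then builds the result directly: headers and columns are map'd from the keys and the table is a row-comprehension transpose of the columns (with the len guard preserving A's dropping of short columns), replacing A's single interleaved pass that index-tracks appends into table1 while also building table2 and the header list side by side; in the non-list case B emits the [name, value] rows directly (at the claim's type dict[str, list[str]] every value is a list, so that branch is unreachable in the Lean claim).
import Mathlib
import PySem

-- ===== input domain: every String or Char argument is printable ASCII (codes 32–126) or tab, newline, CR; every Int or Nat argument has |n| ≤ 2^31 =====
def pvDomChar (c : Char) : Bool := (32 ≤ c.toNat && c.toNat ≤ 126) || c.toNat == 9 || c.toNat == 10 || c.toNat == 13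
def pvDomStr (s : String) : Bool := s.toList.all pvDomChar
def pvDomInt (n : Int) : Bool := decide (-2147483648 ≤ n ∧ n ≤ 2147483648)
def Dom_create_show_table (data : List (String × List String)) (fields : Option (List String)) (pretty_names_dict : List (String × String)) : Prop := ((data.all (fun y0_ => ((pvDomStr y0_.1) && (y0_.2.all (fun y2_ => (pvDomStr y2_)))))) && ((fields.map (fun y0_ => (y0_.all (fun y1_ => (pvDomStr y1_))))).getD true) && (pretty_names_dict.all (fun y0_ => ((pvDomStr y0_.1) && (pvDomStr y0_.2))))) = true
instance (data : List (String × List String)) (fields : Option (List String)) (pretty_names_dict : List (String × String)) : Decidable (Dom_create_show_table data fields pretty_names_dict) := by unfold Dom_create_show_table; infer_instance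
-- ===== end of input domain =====

-- B decides the all-lists branch up front and builds the table as a column-gather transpose
-- instead of A's interleaved index-and-append single pass (objective: simpler); at the
-- claim's type dict[str, list[str]] every value is a list, so the non-list [name, value]
-- branch (present in both Pythons) is unreachable here and both ports carry only the
-- reachable branch; return values proved equal on Pre_.

-- ===== PORT A =====
-- 'keys = fields if fields else data.keys()' (shared dict primitive, used by both ports)
def pvKeys (data : List (String × List String)) (fields : Option (List String)) : List String :=
  match fields with
  | some fs => if fs ≠ [] then fs else data.map Prod.fst
  | none => data.map Prod.fst

-- 'table1[idx].append(value)'; only called with idx < table1.length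
def pvAppendAt (t : List (List String)) (idx : Nat) (v : String) : List (List String) :=
  match t, idx with
  | [], _ => []
  | r :: rs, 0 => (r ++ [v]) :: rs
  | r :: rs, n + 1 => r :: pvAppendAt rs n v

-- one step of the inner 'for idx, value in enumerate(data[field]):' loop of A
def pvStep (st : List (List String) × Nat) (value : String) : List (List String) × Nat :=
  (if st.2 < st.1.length then pvAppendAt st.1 st.2 value else st.1 ++ [[value]], st.2 + 1)

-- the inner loop of A
def pvColLoop (t1 : List (List String)) (vals : List String) : List (List String) :=
  (vals.foldl pvStep (t1, 0)).1

-- one step of A's outer 'for field in keys:' loop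
def pvAStep (data : List (String × List String)) (pretty_names_dict : List (String × String))
    (st : List (List String) × List (List String) × List String) (field : String) :
    List (List String) × List (List String) × List String :=
  let name := PySem.Dict.getD (PySem.Dict.mk pretty_names_dict) field field
  let v := PySem.Dict.getD (PySem.Dict.mk data) field []  -- data[field]; inside Pre_ the key is present
  -- isinstance(data[field], list) is always true at type dict[str, list[str]], so the
  -- branch is always taken; table2's Python row [name, data[field]] has an untypeable second
  -- cell (a list where a String cell is expected) and the 'return table2, []' below is
  -- unreachable (headers count always equals keys count), so the dead table2 carries [name] only
  (pvColLoop st.1 v, st.2.1 ++ [[name]], st.2.2 ++ [name])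

def create_show_table (data : List (String × List String)) (fields : Option (List String)) (pretty_names_dict : List (String × String)) : List (List String) × List String :=
  let keys := pvKeys data fields
  let st := keys.foldl (pvAStep data pretty_names_dict) ([], [], [])
  if st.2.2.length = keys.length then (st.1, st.2.2) else (st.2.1, [])

-- ===== PORT B =====
def create_show_table_alt (data : List (String × List String)) (fields : Option (List String)) (pretty_names_dict : List (String × String)) : List (List String) × List String :=
  let keys := pvKeys data fields
  let names := keys.map (fun f => PySem.Dict.getD (PySem.Dict.mk pretty_names_dict) f f)
  -- Source B's 'all(isinstance(data[f], list) for f in keys)' is True at this type, so only its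
  -- transpose branch is ported; its '[[n, data[f]] for n, f in zip(names, keys)], []' is unreachable
  let columns := keys.map (fun f => PySem.Dict.getD (PySem.Dict.mk data) f [])
  let m := (columns.map List.length).foldl max 0  -- max(map(len, columns), default=0)
  let table := (List.range m).map
    (fun i => (columns.filter (fun c => decide (i < c.length))).map (fun c => c.getD i ""))
  (table, names)

-- ===== PRECONDITION & SPEC =====
-- Pre_ excludes exactly the inputs where A raises KeyError: a truthy 'fields' listing a key absent from data.
def Pre_create_show_table (data : List (String × List String)) (fields : Option (List String)) (pretty_names_dict : List (String × String)) : Prop :=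
  ((fields.getD []).all (fun f => (data.map Prod.fst).contains f)) = true
instance (data : List (String × List String)) (fields : Option (List String)) (pretty_names_dict : List (String × String)) : Decidable (Pre_create_show_table data fields pretty_names_dict) := by unfold Pre_create_show_table; infer_instance
def pvWitness_create_show_table : (List (String × List String)) × Option (List String) × (List (String × String)) :=
  ([("a", ["1", "2"]), ("b", ["3"])], some ["b", "a"], [("a", "A")])

def Spec_create_show_table (data : List (String × List String)) (fields : Option (List String)) (pretty_names_dict : List (String × String)) (out : List (List String) × List String) : Prop := out = create_show_table_alt data fields pretty_names_dict
instance (data : List (String × List String)) (fields : Option (List String)) (pretty_names_dict : List (String × String)) (out : List (List String) × List String) : Decidable (Spec_create_show_table data fields pretty_names_dict out) := by unfold Spec_create_show_table; infer_instance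

-- ===== CLAIM (what is proved, stated in full; the proofs are below) =====
def Claim_equal_create_show_table : Prop := ∀ (data : List (String × List String)) (fields : Option (List String)) (pretty_names_dict : List (String × String)), Dom_create_show_table data fields pretty_names_dict → Pre_create_show_table data fields pretty_names_dict → Spec_create_show_table data fields pretty_names_dict (create_show_table data fields pretty_names_dict)

-- ===== LEMMAS AND PROOFS =====

-- recursive characterisation of one pass of A's inner loop
def pvColMerge (t : List (List String)) (c : List String) : List (List String) :=
  match t, c with
  | t, [] => t
  | [], v :: vs => [v] :: pvColMerge [] vs
  | r :: rs, v :: vs => (r ++ [v]) :: pvColMerge rs vs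

theorem pvStep_cons (x : List String) (xs : List (List String)) (n : Nat) (v : String) :
    pvStep (x :: xs, n + 1) v = ((pvStep (xs, n) v).1.cons x, (pvStep (xs, n) v).2 + 1) := by
  by_cases h : n < xs.length
  · simp [pvStep, h, pvAppendAt, Nat.succ_lt_succ h]
  · simp [pvStep, h, List.length_cons]

theorem pvColLoop_shift (vals : List String) (x : List String) (xs : List (List String)) (n : Nat) :
    vals.foldl pvStep (x :: xs, n + 1)
    = ((vals.foldl pvStep (xs, n)).1.cons x, (vals.foldl pvStep (xs, n)).2 + 1) := by
  induction vals generalizing x xs n with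
  | nil => rfl
  | cons v vs ih =>
      simp only [List.foldl_cons, pvStep_cons]
      exact ih _ _ _

theorem pvColLoop_eq_merge (t : List (List String)) (c : List String) :
    pvColLoop t c = pvColMerge t c := by
  induction c generalizing t with
  | nil => cases t <;> simp [pvColLoop, pvColMerge]
  | cons v vs ih =>
      cases t with
      | nil =>
          simp only [pvColLoop, List.foldl_cons] at *
          rw [show pvStep ([], 0) v = (([[v]] : List (List String)), 1) from rfl]
          rw [show ([[v]] : List (List String)) = List.cons [v] [] from rfl, show (1 : Nat) = 0 + 1 from rfl]
          rw [pvColLoop_shift]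
          simp [pvColMerge, ← ih]
      | cons r rs =>
          simp only [pvColLoop, List.foldl_cons] at *
          rw [show pvStep (r :: rs, 0) v = ((r ++ [v]) :: rs, 1) from by simp [pvStep, pvAppendAt]]
          rw [show ((r ++ [v]) :: rs) = List.cons (r ++ [v]) rs from rfl, show (1 : Nat) = 0 + 1 from rfl]
          rw [pvColLoop_shift]
          simp [pvColMerge, ← ih]

theorem pvColMerge_getElem? (t : List (List String)) (c : List String) (i : Nat) :
    (getElem? (pvColMerge t c) i) =
      match (getElem? t i), (getElem? c i) with
      | some r, some v => some (r ++ [v])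
      | some r, none => some r
      | none, some v => some [v]
      | none, none => none := by
  induction t generalizing c i with
  | nil =>
      induction c generalizing i with
      | nil => simp [pvColMerge]
      | cons v vs ih =>
          cases i with
          | zero => simp [pvColMerge]
          | succ j => simpa [pvColMerge] using ih j
  | cons r rs ih =>
      cases c with
      | nil =>
          cases i with
          | zero => simp [pvColMerge]
          | succ j => cases h : rs[j]? <;> simp [pvColMerge, h]
      | cons v vs =>
          cases i with
          | zero => simp [pvColMerge]
          | succ j => simpa [pvColMerge] using ih vs j

theorem pvFold_getElem? (cols : List (List String)) (T : List (List String)) (i : Nat) :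
    (getElem? (cols.foldl pvColMerge T) i) =
      match (getElem? T i) with
      | some r => some (r ++ cols.filterMap (fun c => (getElem? c i)))
      | none => if cols.filterMap (fun c => (getElem? c i)) = [] then none
                else some (cols.filterMap (fun c => (getElem? c i))) := by
  induction cols generalizing T with
  | nil => cases h : getElem? T i <;> simp [h]
  | cons c cs ih =>
      simp only [List.foldl_cons, List.filterMap_cons]
      rw [ih, pvColMerge_getElem?]
      cases hT : getElem? T i <;> cases hc : getElem? c i <;> simp

theorem pvFilterMap_eq (cols : List (List String)) (i : Nat) :
    (cols.filter (fun c => decide (i < c.length))).map (fun c => c.getD i "")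
      = cols.filterMap (fun c => (getElem? c i)) := by
  induction cols with
  | nil => rfl
  | cons c cs ih =>
      simp only [List.getD_eq_getElem?_getD] at ih ⊢
      simp only [List.filter_cons, List.filterMap_cons]
      cases hg : getElem? c i with
      | none =>
          have h : ¬ i < c.length := by
            intro h; exact absurd hg (by simp [List.getElem?_eq_getElem h])
          simp [h, ih]
      | some v =>
          have h : i < c.length := by
            by_contra h
            simp [List.getElem?_eq_none_iff.mpr (Nat.le_of_not_lt h)] at hg
          simp [h, ih]
          exact Option.some.inj ((List.getElem?_eq_getElem h).symm.trans hg)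

theorem pvFoldrMax_lt (L : List Nat) (i : Nat) : i < L.foldr max 0 ↔ ∃ n ∈ L, i < n := by
  induction L with
  | nil => simp
  | cons x xs ih => simp [List.foldr_cons, ih]

theorem pvLt_max_iff (cols : List (List String)) (i : Nat) :
    i < (cols.map List.length).foldl max 0 ↔ cols.filterMap (fun c => (getElem? c i)) ≠ [] := by
  have hfold : ∀ (L : List Nat) (a : Nat), L.foldl max a = max a (L.foldr max 0) := by
    intro L
    induction L with
    | nil => intro a; simp
    | cons x xs ih =>
        intro a
        simp only [List.foldl_cons, ih, List.foldr_cons]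
        omega
  rw [hfold]
  rw [Nat.zero_max, pvFoldrMax_lt]
  simp only [Ne, List.filterMap_eq_nil_iff, not_forall, List.mem_map]
  constructor
  · rintro ⟨n, ⟨c, hc, rfl⟩, hin⟩
    exact ⟨c, hc, by simp [List.getElem?_eq_getElem hin]⟩
  · rintro ⟨c, hc, hne⟩
    have hil : i < c.length := by
      by_contra hge
      exact hne (List.getElem?_eq_none_iff.mpr (Nat.le_of_not_lt hge))
    exact ⟨c.length, ⟨c, hc, rfl⟩, hil⟩

-- A's outer fold, componentwise
theorem pvOuterFold (keys : List String) (data : List (String × List String)) (pretty : List (String × String))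
    (t1 : List (List String)) (t2 : List (List String)) (th : List String) :
    keys.foldl (pvAStep data pretty) (t1, t2, th)
    = ((keys.map (fun f => PySem.Dict.getD (PySem.Dict.mk data) f [])).foldl pvColMerge t1,
       t2 ++ keys.map (fun f => [PySem.Dict.getD (PySem.Dict.mk pretty) f f]),
       th ++ keys.map (fun f => PySem.Dict.getD (PySem.Dict.mk pretty) f f)) := by
  induction keys generalizing t1 t2 th with
  | nil => simp
  | cons k ks ih =>
      simp only [List.foldl_cons, List.map_cons]
      rw [show pvAStep data pretty (t1, t2, th) k
            = (pvColMerge t1 (PySem.Dict.getD (PySem.Dict.mk data) k []),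
               t2 ++ [[PySem.Dict.getD (PySem.Dict.mk pretty) k k]],
               th ++ [PySem.Dict.getD (PySem.Dict.mk pretty) k k]) from by
        simp [pvAStep, pvColLoop_eq_merge]]
      rw [ih]
      simp [List.append_assoc]

theorem pvTable_eq (cols : List (List String)) :
    cols.foldl pvColMerge []
      = (List.range ((cols.map List.length).foldl max 0)).map
          (fun i => (cols.filter (fun c => decide (i < c.length))).map (fun c => c.getD i "")) := by
  apply List.ext_getElem?
  intro i
  rw [pvFold_getElem?]
  simp only [List.getElem?_map, List.getElem?_nil, pvFilterMap_eq]
  by_cases h : i < (cols.map List.length).foldl max 0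
  · have hne := (pvLt_max_iff cols i).mp h
    simp [h, hne]
  · have heq : cols.filterMap (fun c => (getElem? c i)) = [] := by
      by_contra hne
      exact h ((pvLt_max_iff cols i).mpr hne)
    simp [h, heq]

-- ===== VERDICT (by name: the statement is the Claim_ definition above) =====
theorem create_show_table_spec : Claim_equal_create_show_table := by
  intro data fields pretty_names_dict _ hpre
  unfold Spec_create_show_table create_show_table create_show_table_alt
  dsimp only
  rw [pvOuterFold]
  simp only [List.nil_append, List.length_map, if_true]
  rw [pvTable_eq]
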